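-- pv_equiv track=rewrite | github.com/iisara555/Binance_Cryptonice | cli_ui.py | _group_log_rows
-- ===== SOURCE A (Python) =====
-- from typing import Any, ClassVar, Dict, List, Optional
--
-- def _group_log_rows(rows: "List[Dict[str, str]]") -> "List[Dict[str, str]]":
--     """Collapse runs of 'up to date' log messages into a single counted line."""
--     result: List[Dict[str, str]] = []
--     udt_count = 0
--     last_udt: Optional[Dict[str, str]] = None
--     for row in rows:
--         msg = str(row.get("message") or "").lower()
--         if "up to date" in msg:
--             udt_count += 1
--             last_udt = row
--         else:
--             if udt_count > 0 and last_udt is not None: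
--                 if udt_count > 1:
--                     merged = dict(last_udt)
--                     merged["message"] = f"all pairs: up to date \u00d7{udt_count}"
--                     result.append(merged)
--                 else:
--                     result.append(last_udt)
--                 udt_count = 0
--                 last_udt = None
--             result.append(row)
--     if udt_count > 0 and last_udt is not None:
--         if udt_count > 1:
--             merged = dict(last_udt)
--             merged["message"] = f"all pairs: up to date \u00d7{udt_count}"
--             result.append(merged)
--         else:
--             result.append(last_udt)
--     return result
-- ===== SOURCE B (Python) =====
-- from typing import Dict, List
--
--
-- def _group_log_rows(rows: "List[Dict[str, str]]") -> "List[Dict[str, str]]":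
--     """Collapse runs of 'up to date' log messages into a single counted line.
--
--     Staged-passes version: precompute a flag per row, run-lengths, and a
--     shifted next-flag list, then decide each row independently (a row is
--     kept iff it is not a match, or it is the last row of its run)."""
--     udt = ["up to date" in str(r.get("message") or "").lower() for r in rows]
--     runlen = []
--     k = 0
--     for f in udt:
--         k = k + 1 if f else 0
--         runlen.append(k)
--     nxt = udt[1:] + [False]
--     out: List[Dict[str, str]] = []
--     for row, f, nf, k in zip(rows, udt, nxt, runlen):
--         if not f:
--             out.append(row)
--         elif not nf:
--             if k == 1:
--                 out.append(row)
--             else: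
--                 merged = dict(row)
--                 merged["message"] = f"all pairs: up to date \u00d7{k}"
--                 out.append(merged)
--     return out
-- ===== Notes on version B (the rewrite author's own statement) =====
-- stated objective: alternative
-- what changed: Replaced A's stateful single-pass accumulator (udt_count/last_udt with duplicated flush blocks) by staged passes: precompute per-row match flags, prefix run-lengths and a shifted next-flag list, then emit each row independently from the zipped data (a matching row is kept only when it ends its run).
import Mathlib
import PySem

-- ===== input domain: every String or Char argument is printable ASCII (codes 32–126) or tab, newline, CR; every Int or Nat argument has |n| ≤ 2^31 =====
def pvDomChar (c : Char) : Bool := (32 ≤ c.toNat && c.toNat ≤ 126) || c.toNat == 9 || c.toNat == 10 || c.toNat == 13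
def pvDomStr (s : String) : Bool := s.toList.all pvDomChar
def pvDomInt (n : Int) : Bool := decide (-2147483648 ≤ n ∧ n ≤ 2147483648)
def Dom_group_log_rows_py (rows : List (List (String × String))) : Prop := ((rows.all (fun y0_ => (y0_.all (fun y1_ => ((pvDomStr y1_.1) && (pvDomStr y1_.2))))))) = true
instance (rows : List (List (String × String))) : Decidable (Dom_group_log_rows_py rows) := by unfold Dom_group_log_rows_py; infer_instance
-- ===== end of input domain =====

-- B replaces A's stateful accumulator/flush single pass by staged passes: precomputed
-- match flags, prefix run-lengths and a shifted next-flag list, then a per-row decision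
-- over the zipped lists (objective: alternative decomposition; same cost).

-- shared helpers: both Pythons compute the same key and the same merged row
-- msg = str(row.get("message") or "").lower(); "up to date" in msg
def pvIsUdt (row : List (String × String)) : Bool :=
  PySem.Str.isIn "up to date" (PySem.Str.lower (((PySem.Dict.mk row).get? "message").getD ""))

-- merged = dict(last); merged["message"] = f"all pairs: up to date ×{cnt}"
def pvMerge (row : List (String × String)) (cnt : Nat) : List (String × String) :=
  ((PySem.Dict.mk row).insert "message" ("all pairs: up to date \u00d7" ++ PySem.Int.toStr (cnt : Int))).items

-- ===== PORT A =====
-- the duplicated flush block of A (run when a non-udt row arrives and at the end)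
def pvFlushA (cnt : Nat) (last : Option (List (String × String))) : List (List (String × String)) :=
  if cnt > 0 then
    match last with
    | some l => if cnt > 1 then [pvMerge l cnt] else [l]
    | none => []
  else []

def pvLoopA (rows result : List (List (String × String))) (cnt : Nat)
    (last : Option (List (String × String))) : List (List (String × String)) :=
  match rows with
  | [] => result ++ pvFlushA cnt last
  | r :: rs =>
    if pvIsUdt r then pvLoopA rs result (cnt + 1) (some r)
    else pvLoopA rs (result ++ pvFlushA cnt last ++ [r]) 0 none

def group_log_rows_py (rows : List (List (String × String))) : List (List (String × String)) :=
  pvLoopA rows [] 0 none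

-- ===== PORT B =====
-- emission decision of B's final loop body (append row / merged row / nothing)
def pvEmit (row : List (String × String)) (f nf : Bool) (k : Nat) : List (List (String × String)) :=
  if !f then [row]
  else if !nf then (if k = 1 then [row] else [pvMerge row k])
  else []

def group_log_rows_py_alt (rows : List (List (String × String))) : List (List (String × String)) :=
  let udt := rows.map pvIsUdt
  let runlen := (udt.foldl (fun (p : List Nat × Nat) f =>
      let k := if f then p.2 + 1 else 0; (p.1 ++ [k], k)) ([], 0)).1
  let nxt := udt.drop 1 ++ [false]
  ((rows.zip udt).zip (nxt.zip runlen)).foldl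
    (fun out q => out ++ pvEmit q.1.1 q.1.2 q.2.1 q.2.2) []

-- ===== PRECONDITION & SPEC =====
def Spec_group_log_rows_py (rows : List (List (String × String))) (out : List (List (String × String))) : Prop := out = group_log_rows_py_alt rows
instance (rows : List (List (String × String))) (out : List (List (String × String))) : Decidable (Spec_group_log_rows_py rows out) := by unfold Spec_group_log_rows_py; infer_instance

-- ===== CLAIM =====
def Claim_equal_group_log_rows_py : Prop := ∀ (rows : List (List (String × String))), Dom_group_log_rows_py rows → Spec_group_log_rows_py rows (group_log_rows_py rows)

-- ===== LEMMAS AND PROOFS =====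

-- B's run-length list with seed k0, characterised recursively
def pvRunsFrom (fs : List Bool) (k0 : Nat) : List Nat :=
  match fs with
  | [] => []
  | f :: fs' => let k := if f then k0 + 1 else 0; k :: pvRunsFrom fs' k

-- B written as one structural recursion carrying the incoming run length k0
def pvAltRec (rows : List (List (String × String))) (k0 : Nat) : List (List (String × String)) :=
  match rows with
  | [] => []
  | r :: rs =>
    let f := pvIsUdt r
    let k := if f then k0 + 1 else 0
    let nf := match rs with | [] => false | s :: _ => pvIsUdt s
    pvEmit r f nf k ++ pvAltRec rs k

theorem pvRuns_foldl (fs : List Bool) : ∀ acc k0,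
    (fs.foldl (fun (p : List Nat × Nat) f =>
      let k := if f then p.2 + 1 else 0; (p.1 ++ [k], k)) (acc, k0)).1 = acc ++ pvRunsFrom fs k0 := by
  induction fs with
  | nil => intro acc k0; simp [pvRunsFrom]
  | cons f fs' ih => intro acc k0; simp [pvRunsFrom, ih]

-- the zipped flatMap of B equals the structural recursion
theorem pvZip_eq_altRec (rows : List (List (String × String))) : ∀ k0,
    ((rows.zip (rows.map pvIsUdt)).zip
        (((rows.map pvIsUdt).drop 1 ++ [false]).zip (pvRunsFrom (rows.map pvIsUdt) k0))).flatMap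
      (fun q => pvEmit q.1.1 q.1.2 q.2.1 q.2.2) = pvAltRec rows k0 := by
  induction rows with
  | nil => intro k0; simp [pvAltRec]
  | cons r rs ih =>
    intro k0
    cases rs with
    | nil => simp [pvAltRec, pvRunsFrom]
    | cons s ss =>
      simp only [List.map_cons, List.zip_cons_cons, List.drop_one, List.tail_cons,
        List.cons_append, pvRunsFrom, List.flatMap_cons, pvAltRec]
      have h := ih (if pvIsUdt r then k0 + 1 else 0)
      simp only [List.map_cons, List.zip_cons_cons, List.drop_one, List.tail_cons,
        pvRunsFrom] at h
      rw [h]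
      simp [pvAltRec]

-- the port of B equals the structural recursion at seed 0
theorem pvAlt_eq_altRec (rows : List (List (String × String))) :
    group_log_rows_py_alt rows = pvAltRec rows 0 := by
  unfold group_log_rows_py_alt
  rw [PySem.List.foldl_append_eq_flatMap, pvRuns_foldl]
  simp only [List.nil_append]
  exact pvZip_eq_altRec rows 0

-- head flag of the remaining rows (B's shifted next-flag)
def pvHeadFlag (rs : List (List (String × String))) : Bool :=
  match rs with | [] => false | s :: _ => pvIsUdt s

theorem pvFlush_eq_emit (cnt : Nat) (l : List (String × String)) (hc : 0 < cnt) :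
    pvFlushA cnt (some l) = pvEmit l true false cnt := by
  rcases Nat.lt_or_ge 1 cnt with h | h
  · simp [pvFlushA, pvEmit, hc, h, Nat.ne_of_gt h]
  · have h1 : cnt = 1 := by omega
    simp [h1, pvFlushA, pvEmit]

theorem pvLoopA_result (rs : List (List (String × String))) :
    ∀ res cnt last, pvLoopA rs res cnt last = res ++ pvLoopA rs [] cnt last := by
  induction rs with
  | nil => intro res cnt last; simp [pvLoopA]
  | cons s ss ih =>
    intro res cnt last
    simp only [pvLoopA]
    by_cases h : pvIsUdt s
    · simp only [h, if_true]
      rw [ih res, ih ([] : List (List (String × String)))]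
    · simp only [h, Bool.false_eq_true, if_false]
      rw [ih (res ++ pvFlushA cnt last ++ [s]), ih (([] : List (List (String × String))) ++ pvFlushA cnt last ++ [s])]
      simp

-- mutual invariant: A's loop from the empty state equals pvAltRec _ 0, and A's loop
-- with a pending run (count cnt, last row l) equals the deferred emission plus pvAltRec _ cnt
theorem pvMain (n : Nat) : ∀ rows : List (List (String × String)), rows.length ≤ n →
    (pvLoopA rows [] 0 none = pvAltRec rows 0) ∧
    (∀ (cnt : Nat) (l : List (String × String)), 0 < cnt →
      pvLoopA rows [] cnt (some l) = pvEmit l true (pvHeadFlag rows) cnt ++ pvAltRec rows cnt) := by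
  induction n with
  | zero =>
    intro rows h
    have : rows = [] := List.eq_nil_of_length_eq_zero (Nat.le_zero.mp h)
    subst this
    refine ⟨by simp [pvLoopA, pvFlushA, pvAltRec], ?_⟩
    intro cnt l hc
    simp only [pvLoopA, pvAltRec, pvHeadFlag, List.nil_append, List.append_nil]
    exact pvFlush_eq_emit cnt l hc
  | succ n ih =>
    intro rows h
    match rows with
    | [] =>
      refine ⟨by simp [pvLoopA, pvFlushA, pvAltRec], ?_⟩
      intro cnt l hc
      simp only [pvLoopA, pvAltRec, pvHeadFlag, List.nil_append, List.append_nil]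
      exact pvFlush_eq_emit cnt l hc
    | r :: rs =>
      have hlen : rs.length ≤ n := Nat.le_of_succ_le_succ h
      constructor
      · by_cases hr : pvIsUdt r
        · have h1 : pvLoopA (r :: rs) [] 0 none = pvLoopA rs [] 1 (some r) := by
            simp [pvLoopA, hr]
          rw [h1, (ih rs hlen).2 1 r (by omega)]
          simp [pvAltRec, hr, pvHeadFlag]
        · have h1 : pvLoopA (r :: rs) [] 0 none = [r] ++ pvLoopA rs [] 0 none := by
            simp only [pvLoopA, hr, Bool.false_eq_true, if_false]
            rw [pvLoopA_result]
            simp [pvFlushA]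
          rw [h1, (ih rs hlen).1]
          simp [pvAltRec, hr, pvEmit]
      · intro cnt l hc
        by_cases hr : pvIsUdt r
        · have h1 : pvLoopA (r :: rs) [] cnt (some l) = pvLoopA rs [] (cnt + 1) (some r) := by
            simp [pvLoopA, hr]
          rw [h1, (ih rs hlen).2 (cnt + 1) r (by omega)]
          simp [pvAltRec, pvEmit, pvHeadFlag, hr]
        · have h1 : pvLoopA (r :: rs) [] cnt (some l) =
              (pvFlushA cnt (some l) ++ [r]) ++ pvLoopA rs [] 0 none := by
            simp only [pvLoopA, hr, Bool.false_eq_true, if_false]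
            rw [pvLoopA_result]
            simp
          rw [h1, (ih rs hlen).1]
          rw [pvFlush_eq_emit cnt l hc]
          simp [pvAltRec, pvEmit, pvHeadFlag, hr]

-- ===== VERDICT =====
theorem group_log_rows_py_spec : Claim_equal_group_log_rows_py := by
  intro rows _
  unfold Spec_group_log_rows_py group_log_rows_py
  rw [pvAlt_eq_altRec]
  exact (pvMain rows.length rows le_rfl).1
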